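-- pv_equiv track=rewrite | github.com/Blitzy29/doggo | src/utils/plots.py | get_info_params
-- ===== SOURCE A (Python) =====
-- def get_info_params(dict_args):
--
--     info_params = ''
--     cnt = 0
--     for key_args in dict_args:
--         if cnt == 3:
--             info_params += ' \n '
--             cnt = 0
--         info_params += '{}: {} - '.format(key_args, dict_args[key_args])
--         cnt += 1
--
--     return info_params[:-3]
-- ===== SOURCE B (Python) =====
-- def get_info_params(dict_args):
--     items = ['{}: {} - '.format(k, v) for k, v in dict_args.items()]
--     lines = []
--     while items:
--         lines.append(''.join(items[:3]))
--         items = items[3:]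
--     return ' \n '.join(lines)[:-3]
-- ===== Notes on version B (the rewrite author's own statement) =====
-- stated objective: alternative
-- what changed: Replaces A's counter-driven single loop (append fragment, insert ' \n ' whenever the counter hits 3, reset) by a build-then-group decomposition: format all fragments first, chunk them into lines of three, join the lines with ' \n ' once and strip the trailing ' - ' once.
import Mathlib
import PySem

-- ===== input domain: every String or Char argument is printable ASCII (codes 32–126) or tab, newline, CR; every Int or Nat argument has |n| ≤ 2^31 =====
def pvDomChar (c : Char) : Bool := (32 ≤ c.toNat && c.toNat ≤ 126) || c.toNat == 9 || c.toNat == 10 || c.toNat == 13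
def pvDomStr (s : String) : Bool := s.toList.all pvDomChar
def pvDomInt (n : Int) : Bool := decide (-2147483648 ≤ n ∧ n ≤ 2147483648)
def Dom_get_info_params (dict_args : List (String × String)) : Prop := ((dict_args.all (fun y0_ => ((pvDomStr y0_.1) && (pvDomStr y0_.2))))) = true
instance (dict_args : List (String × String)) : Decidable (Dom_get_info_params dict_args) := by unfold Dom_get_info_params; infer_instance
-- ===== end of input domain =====

-- B replaces A's counter-driven accumulating loop by a build-then-group decomposition
-- (format all fragments, chunk into lines of three, join once and strip once); same cost, alternative structure.


-- ===== PORT A =====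
-- A: info_params = ''; cnt = 0; for key in dict: if cnt == 3 add ' \n ' and reset;
--    append '{}: {} - '.format(key, dict[key]); cnt += 1; return info_params[:-3]
def get_info_params (dict_args : List (String × String)) : String :=
  let d := PySem.Dict.mk dict_args
  let r := dict_args.foldl (fun (st : List Char × Nat) kv =>
      let st1 := if st.2 == 3 then (st.1 ++ [' ', '\n', ' '], 0) else st
      (st1.1 ++ kv.1.toList ++ [':', ' '] ++ (PySem.Dict.getD d kv.1 "").toList ++ [' ', '-', ' '],
       st1.2 + 1))
    (([] : List Char), 0)
  String.ofList (PySem.List.slice r.1 none (some (-3)))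

-- ===== PORT B =====
-- '{}: {} - '.format(k, v)
def pvFrag (kv : String × String) : List Char :=
  kv.1.toList ++ [':', ' '] ++ kv.2.toList ++ [' ', '-', ' ']

-- the while loop of Source B: lines.append(''.join(items[:3])); items = items[3:]
def pvLines : List (List Char) → List (List Char)
  | [] => []
  | x :: r =>
      PySem.Chars.join [] (List.take 3 (x :: r)) :: pvLines (List.drop 3 (x :: r))
  termination_by l => l.length
  decreasing_by simp

def get_info_params_alt (dict_args : List (String × String)) : String :=
  let items := dict_args.map pvFrag
  let lines := pvLines items
  String.ofList (PySem.List.slice (PySem.Chars.join [' ', '\n', ' '] lines) none (some (-3)))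

-- ===== PRECONDITION & SPEC =====
-- Pre_ excludes association lists with duplicate keys: they do not faithfully encode a Python
-- dict (dict construction collapses duplicates before either function runs, and both Pythons
-- then return the same value), so the assoc-list ports' first-match reading cannot represent them.
def Pre_get_info_params (dict_args : List (String × String)) : Prop :=
  (dict_args.map Prod.fst).Nodup
instance (dict_args : List (String × String)) : Decidable (Pre_get_info_params dict_args) := by
  unfold Pre_get_info_params; infer_instance

def pvWitness_get_info_params : (List (String × String)) :=
  [("a", "1"), ("b", "2"), ("c", "3"), ("d", "4")]

def Spec_get_info_params (dict_args : List (String × String)) (out : String) : Prop := out = get_info_params_alt dict_args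
instance (dict_args : List (String × String)) (out : String) : Decidable (Spec_get_info_params dict_args out) := by unfold Spec_get_info_params; infer_instance

-- ===== CLAIM (what is proved, stated in full; the proofs are below) =====
def Claim_equal_get_info_params : Prop := ∀ (dict_args : List (String × String)), Dom_get_info_params dict_args → Pre_get_info_params dict_args → Spec_get_info_params dict_args (get_info_params dict_args)

-- ===== LEMMAS AND PROOFS =====

-- A's loop, once the dict lookup has been resolved to the pair's own value.
def pvLoop (l : List (List Char)) (st : List Char × Nat) : List Char × Nat :=
  l.foldl (fun st p =>
      let st1 := if st.2 == 3 then (st.1 ++ [' ', '\n', ' '], 0) else st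
      (st1.1 ++ p, st1.2 + 1)) st

theorem pvLines_nil : pvLines [] = [] := by rw [pvLines]

theorem pvLines_cons (x : List Char) (r : List (List Char)) :
    pvLines (x :: r)
      = PySem.Chars.join [] (List.take 3 (x :: r)) :: pvLines (List.drop 3 (x :: r)) := by
  rw [pvLines]

theorem pvLoop_eq (l : List (List Char)) (s : List Char) :
    (pvLoop l (s, 0)).1 = s ++ PySem.Chars.join [' ', '\n', ' '] (pvLines l) := by
  match l with
  | [] => simp [pvLoop, pvLines_nil, PySem.Chars.join_nil]
  | [a] =>
      rw [pvLines_cons]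
      simp [pvLoop, pvLines_nil, PySem.Chars.join_singleton]
  | [a, b] =>
      rw [pvLines_cons]
      simp [pvLoop, pvLines_nil, PySem.Chars.join_singleton, PySem.Chars.join_cons_cons,
        List.append_assoc]
  | [a, b, c] =>
      rw [pvLines_cons]
      simp [pvLoop, pvLines_nil, PySem.Chars.join_singleton, PySem.Chars.join_cons_cons,
        List.append_assoc]
  | a :: b :: c :: x :: r =>
      have ih := pvLoop_eq (x :: r) (s ++ a ++ b ++ c ++ [' ', '\n', ' '])
      have hstep :
          (pvLoop (a :: b :: c :: x :: r) (s, 0)).1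
            = (pvLoop (x :: r) (s ++ a ++ b ++ c ++ [' ', '\n', ' '], 0)).1 := by
        simp [pvLoop, List.foldl]
      rw [hstep, ih]
      have hl : pvLines (a :: b :: c :: x :: r)
          = PySem.Chars.join [] [a, b, c] :: pvLines (x :: r) := by
        rw [pvLines_cons]; simp
      rw [hl]
      have hxr : ∃ y ys, pvLines (x :: r) = y :: ys := by
        rw [pvLines_cons]; exact ⟨_, _, rfl⟩
      obtain ⟨y, ys, hy⟩ := hxr
      rw [hy, PySem.Chars.join_cons_cons]
      simp [PySem.Chars.join_cons_cons, PySem.Chars.join_singleton, List.append_assoc]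
  termination_by l.length

theorem get_info_params_spec : Claim_equal_get_info_params := by
  intro dict_args _hdom hpre
  unfold Spec_get_info_params get_info_params get_info_params_alt
  have hcongr :
      dict_args.foldl (fun (st : List Char × Nat) kv =>
          let st1 := if st.2 == 3 then (st.1 ++ [' ', '\n', ' '], 0) else st
          (st1.1 ++ kv.1.toList ++ [':', ' ']
             ++ (PySem.Dict.getD (PySem.Dict.mk dict_args) kv.1 "").toList ++ [' ', '-', ' '],
           st1.2 + 1))
        (([] : List Char), 0)
        = dict_args.foldl (fun (st : List Char × Nat) kv =>
            let st1 := if st.2 == 3 then (st.1 ++ [' ', '\n', ' '], 0) else st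
            (st1.1 ++ pvFrag kv, st1.2 + 1))
          (([] : List Char), 0) := by
    apply PySem.List.foldl_congr_mem
    intro acc kv hmem
    have hval : PySem.Dict.getD (PySem.Dict.mk dict_args) kv.1 "" = kv.2 := by
      apply PySem.Dict.getD_of_mem_items (PySem.Dict.mk dict_args)
          (k := kv.1) (v := kv.2)
      · simpa [PySem.Dict.items] using hmem
      · simpa [PySem.Dict.keys] using hpre
    simp [hval, pvFrag, List.append_assoc]
  simp only [hcongr]
  have hmap :
      dict_args.foldl (fun (st : List Char × Nat) kv =>
          let st1 := if st.2 == 3 then (st.1 ++ [' ', '\n', ' '], 0) else st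
          (st1.1 ++ pvFrag kv, st1.2 + 1))
        (([] : List Char), 0)
        = pvLoop (dict_args.map pvFrag) (([] : List Char), 0) := by
    simp [pvLoop, List.foldl_map]
  simp only [hmap, pvLoop_eq (dict_args.map pvFrag) []]
  simp
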